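-- pv_equiv track=rewrite | github.com/LeyangWen/vicon-read | conversion_scripts/Veeru/rtm_pose_read_kps.py | find_minimum_values
-- ===== SOURCE A (Python) =====
-- def find_minimum_values(distance):
--     min_values = [min(distance[key][i] for key in distance) for i in range(len(next(iter(distance.values()))))]
--     min_idxs_count = {}
--     for i in range(len(min_values)):
--         for k in distance.keys():
--             if distance[k][i] == min_values[i]:
--                 if k not in min_idxs_count:
--                     min_idxs_count[k] = 1
--                 else:
--                     min_idxs_count[k] += 1
--                 break
--     for k in min_idxs_count.keys():
--         if min_idxs_count[k] == max(min_idxs_count.values()):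
--             return k
-- ===== SOURCE B (Python) =====
-- def find_minimum_values(distance):
--     items = iter(distance.items())
--     k0, v0 = next(items)
--     n = len(v0)
--     best = [(v0[i], k0) for i in range(n)]
--     for k, vals in items:
--         best = [(vals[i], k) if vals[i] < best[i][0] else best[i] for i in range(n)]
--     counts = {}
--     for _, w in best:
--         counts[w] = counts.get(w, 0) + 1
--     return max(counts, key=counts.get)
-- ===== Notes on version B (the rewrite author's own statement) =====
-- stated objective: alternative
-- what changed: B transposes the traversal: instead of A's column-major structure (a precomputed min_values table, then per column a break-scan over the keys), it makes one key-major pass over distance.items() maintaining a per-column (best value, winning key) array updated on strict <, then counts the winners and returns the first count-maximal key via max(counts, key=counts.get).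
-- outside the precondition, e.g. on find_minimum_values({'a': []}): A returns None, B raises ValueError
import Mathlib
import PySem

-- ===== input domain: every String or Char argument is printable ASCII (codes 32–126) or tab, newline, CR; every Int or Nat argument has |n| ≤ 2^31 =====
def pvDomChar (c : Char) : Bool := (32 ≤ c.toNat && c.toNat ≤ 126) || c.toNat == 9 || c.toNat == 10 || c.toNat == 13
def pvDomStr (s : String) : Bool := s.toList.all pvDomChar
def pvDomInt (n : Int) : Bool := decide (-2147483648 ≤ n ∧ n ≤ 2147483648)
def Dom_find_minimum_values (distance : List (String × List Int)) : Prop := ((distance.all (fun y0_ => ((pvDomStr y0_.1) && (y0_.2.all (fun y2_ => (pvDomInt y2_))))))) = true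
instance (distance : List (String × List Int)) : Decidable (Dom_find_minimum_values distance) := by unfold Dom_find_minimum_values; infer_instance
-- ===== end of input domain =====

-- B transposes A's column-major traversal into one key-major pass keeping a per-column
-- (best value, winning key) array (objective: alternative; same asymptotic cost).

-- ===== PORT A =====
-- distance[k][i]: dict lookup, then list index (both always succeed on the admitted inputs)
def pvValA (distance : List (String × List Int)) (i : Int) (k : String) : Int :=
  PySem.List.pyGetD (((PySem.Dict.mk distance).get? k).getD []) i 0

-- A's inner `for k in distance.keys(): … break` loop for one column i
def pvScanA (distance : List (String × List Int)) (minValues : List Int) (i : Int) :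
    List String → PySem.Dict String Int → PySem.Dict String Int
  | [], c => c
  | k :: rest, c =>
    if pvValA distance i k == PySem.List.pyGetD minValues i 0 then
      if c.contains k = false then c.insert k 1 else c.insert k (c.getD k 0 + 1)
    else pvScanA distance minValues i rest c

def find_minimum_values (distance : List (String × List Int)) : String :=
  let d := PySem.Dict.mk distance
  let minValues : List Int :=
    (PySem.List.pyRange 0 ((d.values.head?.getD []).length : Int) 1).map (fun i =>
      (PySem.List.min? (d.keys.map (fun k => pvValA distance i k)) (fun v => v)).getD 0)
  let cnt := (PySem.List.pyRange 0 ((minValues.length : Int)) 1).foldl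
      (fun c i => pvScanA distance minValues i d.keys c) PySem.Dict.empty
  (cnt.keys.find? (fun k =>
      cnt.getD k 0 == (PySem.List.max? cnt.values (fun v => v)).getD 0)).getD ""

-- ===== PORT B =====
-- Source B: k0, v0 = next(iter(distance.items())); a key-major pass rebuilding the per-column
-- (best value, winning key) list with a comprehension, then a counting loop and max(counts, key=…).
def find_minimum_values_alt (distance : List (String × List Int)) : String :=
  match distance with
  | [] => ""   -- next(items) raises StopIteration in Python; outside Pre_
  | (k0, v0) :: rest =>
    let n : Int := v0.length
    let best0 : List (Int × String) :=
      (PySem.List.pyRange 0 n 1).map (fun i => (PySem.List.pyGetD v0 i 0, k0))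
    let best := rest.foldl (fun b kv =>
      (PySem.List.pyRange 0 n 1).map (fun i =>
        if PySem.List.pyGetD kv.2 i 0 < (PySem.List.pyGetD b i (0, "")).1
        then (PySem.List.pyGetD kv.2 i 0, kv.1)
        else PySem.List.pyGetD b i (0, ""))) best0
    let counts := best.foldl (fun c p => c.insert p.2 (c.getD p.2 0 + 1))
      (PySem.Dict.empty : PySem.Dict String Int)
    (PySem.List.max? counts.keys (fun k => counts.getD k 0)).getD ""

-- ===== PRECONDITION & SPEC =====
-- Pre_ excludes exactly the inputs on which the Python A does not return a string: the empty dict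
-- (StopIteration from next(iter(...))), a value list shorter than the first one (IndexError), and
-- an empty first value list, on which A runs no loop and returns None (not a value of type str);
-- it also requires distinct keys, since a Python dict cannot hold duplicates.
def Pre_find_minimum_values (distance : List (String × List Int)) : Prop :=
  distance ≠ [] ∧ (distance.map Prod.fst).Nodup ∧
  0 < ((distance.head?.map Prod.snd).getD []).length ∧
  ∀ p ∈ distance, ((distance.head?.map Prod.snd).getD []).length ≤ p.2.length
instance (distance : List (String × List Int)) : Decidable (Pre_find_minimum_values distance) := by
  unfold Pre_find_minimum_values; infer_instance

def pvWitness_find_minimum_values : (List (String × List Int)) :=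
  [("a", [1, 2]), ("b", [0, 3])]

def Spec_find_minimum_values (distance : List (String × List Int)) (out : String) : Prop := out = find_minimum_values_alt distance
instance (distance : List (String × List Int)) (out : String) : Decidable (Spec_find_minimum_values distance out) := by unfold Spec_find_minimum_values; infer_instance

-- ===== CLAIM (what is proved, stated in full; the proofs are below) =====
def Claim_equal_find_minimum_values : Prop := ∀ (distance : List (String × List Int)), Dom_find_minimum_values distance → Pre_find_minimum_values distance → Spec_find_minimum_values distance (find_minimum_values distance)

-- ===== LEMMAS AND PROOFS =====

theorem pv_foldl_optM {α : Type} (f : α → Int) (a : α) (l : List α) :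
    List.foldl (fun acc x => match acc with
        | none => some x
        | some m => if f m < f x then some x else some m) (some a) l
      = some (l.foldl (fun b x => if f b < f x then x else b) a) := by
  induction l generalizing a with
  | nil => rfl
  | cons x xs ih =>
      simp only [List.foldl_cons]
      by_cases h : f a < f x <;> simp [h, ih]

theorem pv_max?_cons {α : Type} (f : α → Int) (a : α) (l : List α) :
    PySem.List.max? (a :: l) f
      = some (l.foldl (fun b x => if f b < f x then x else b) a) := by
  simp only [PySem.List.max?, List.foldl_cons]
  exact pv_foldl_optM f a l

theorem pv_find_first_min {α : Type} (f : α → Int) (a : α) (l : List α) :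
    (a :: l).find? (fun x => f x == (l.map f).foldl min (f a))
      = some (l.foldl (fun b x => if f x < f b then x else b) a) := by
  induction l generalizing a with
  | nil => simp [List.find?]
  | cons x xs ih =>
      simp only [List.map_cons, List.foldl_cons]
      by_cases h : f x < f a
      · have hmin : min (f a) (f x) = f x := by rw [min_def]; omega
        rw [hmin, if_pos h]
        have hM := (PySem.List.foldl_min_le (List.map f xs) (f x)).1
        have hane : (f a == List.foldl min (f x) (List.map f xs)) = false := by
          simp only [beq_eq_false_iff_ne, ne_eq]; omega
        simp only [List.find?_cons, hane]
        exact ih x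
      · have hmin : min (f a) (f x) = f a := by rw [min_def]; omega
        rw [hmin, if_neg h]
        have hM := (PySem.List.foldl_min_le (List.map f xs) (f a)).1
        by_cases ha : f a = List.foldl min (f a) (List.map f xs)
        · have hpa : (f a == List.foldl min (f a) (List.map f xs)) = true := by
            simp only [beq_iff_eq]; exact ha
          have := ih a
          simp only [List.find?_cons, hpa] at this ⊢
          exact this
        · have hpa : (f a == List.foldl min (f a) (List.map f xs)) = false := by
            simp only [beq_eq_false_iff_ne, ne_eq]; exact ha
          have hpx : (f x == List.foldl min (f a) (List.map f xs)) = false := by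
            simp only [beq_eq_false_iff_ne, ne_eq]; intro hc; omega
          have := ih a
          simp only [List.find?_cons, hpa, hpx] at this ⊢
          exact this

theorem pv_find_first_max {α : Type} (f : α → Int) (a : α) (l : List α) :
    (a :: l).find? (fun x => f x == (l.map f).foldl max (f a))
      = some (l.foldl (fun b x => if f b < f x then x else b) a) := by
  induction l generalizing a with
  | nil => simp [List.find?]
  | cons x xs ih =>
      simp only [List.map_cons, List.foldl_cons]
      by_cases h : f a < f x
      · have hmax : max (f a) (f x) = f x := by rw [max_def]; omega
        rw [hmax, if_pos h]
        have hM := (PySem.List.le_foldl_max (List.map f xs) (f x)).1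
        have hane : (f a == List.foldl max (f x) (List.map f xs)) = false := by
          simp only [beq_eq_false_iff_ne, ne_eq]; omega
        simp only [List.find?_cons, hane]
        exact ih x
      · have hmax : max (f a) (f x) = f a := by rw [max_def]; omega
        rw [hmax, if_neg h]
        have hM := (PySem.List.le_foldl_max (List.map f xs) (f a)).1
        by_cases ha : f a = List.foldl max (f a) (List.map f xs)
        · have hpa : (f a == List.foldl max (f a) (List.map f xs)) = true := by
            simp only [beq_iff_eq]; exact ha
          have := ih a
          simp only [List.find?_cons, hpa] at this ⊢
          exact this
        · have hpa : (f a == List.foldl max (f a) (List.map f xs)) = false := by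
            simp only [beq_eq_false_iff_ne, ne_eq]; exact ha
          have hpx : (f x == List.foldl max (f a) (List.map f xs)) = false := by
            simp only [beq_eq_false_iff_ne, ne_eq]; intro hc; omega
          have := ih a
          simp only [List.find?_cons, hpa, hpx] at this ⊢
          exact this

theorem pv_scanA_eq_find (distance : List (String × List Int)) (mv : List Int) (i : Int)
    (keys : List String) (c : PySem.Dict String Int) :
    pvScanA distance mv i keys c
      = match keys.find? (fun k => pvValA distance i k == PySem.List.pyGetD mv i 0) with
        | some k => c.insert k (c.getD k 0 + 1)
        | none => c := by
  induction keys with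
  | nil => rfl
  | cons k rest ih =>
      cases hb : (pvValA distance i k == PySem.List.pyGetD mv i 0) with
      | false => simp only [pvScanA, hb, Bool.false_eq_true, if_false, List.find?_cons]; exact ih
      | true =>
          simp only [pvScanA, hb, if_true, List.find?_cons]
          cases hc : c.contains k with
          | false =>
              rw [if_pos rfl, PySem.Dict.getD_of_not_contains (h := hc)]; norm_num
          | true => simp

theorem pv_final_eq (ws : List String) :
    ((PySem.Dict.counter ws).keys.find? (fun k =>
        (PySem.Dict.counter ws).getD k 0
          == (PySem.List.max? (PySem.Dict.counter ws).values (fun v => v)).getD 0)).getD ""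
      = (PySem.List.max? (PySem.Dict.counter ws).keys
          (fun k => (PySem.Dict.counter ws).getD k 0)).getD "" := by
  rw [PySem.Dict.values_eq_map_keys _ (PySem.Dict.nodup_keys_counter ws) 0]
  cases hK : (PySem.Dict.counter ws).keys with
  | nil => simp [PySem.List.max?]
  | cons a l =>
      rw [List.map_cons, PySem.List.max?_id_cons, pv_max?_cons]
      simp only [Option.getD_some]
      rw [pv_find_first_max (fun k => (PySem.Dict.counter ws).getD k 0) a l]
      simp

-- B side: pulling the map over columns out of the key-major fold (loop transposition)
theorem pv_transpose (n : Int) (l : List (String × List Int)) (g : Int → Int × String) :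
    l.foldl (fun b kv =>
        (PySem.List.pyRange 0 n 1).map (fun i =>
          if PySem.List.pyGetD kv.2 i 0 < (PySem.List.pyGetD b i (0, "")).1
          then (PySem.List.pyGetD kv.2 i 0, kv.1)
          else PySem.List.pyGetD b i (0, "")))
      ((PySem.List.pyRange 0 n 1).map g)
    = (PySem.List.pyRange 0 n 1).map (fun i =>
        l.foldl (fun p kv =>
          if PySem.List.pyGetD kv.2 i 0 < p.1 then (PySem.List.pyGetD kv.2 i 0, kv.1) else p) (g i)) := by
  induction l generalizing g with
  | nil => rfl
  | cons kv rest ih =>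
      simp only [List.foldl_cons]
      have hstep : (PySem.List.pyRange 0 n 1).map (fun i =>
          if PySem.List.pyGetD kv.2 i 0 < (PySem.List.pyGetD ((PySem.List.pyRange 0 n 1).map g) i (0, "")).1
          then (PySem.List.pyGetD kv.2 i 0, kv.1)
          else PySem.List.pyGetD ((PySem.List.pyRange 0 n 1).map g) i (0, ""))
        = (PySem.List.pyRange 0 n 1).map (fun i =>
          if PySem.List.pyGetD kv.2 i 0 < (g i).1 then (PySem.List.pyGetD kv.2 i 0, kv.1) else g i) := by
        apply List.map_congr_left
        intro i hi
        obtain ⟨hi0, hin⟩ := PySem.List.mem_pyRange_one.mp hi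
        rw [PySem.List.pyGetD_map_pyRange_of_nonneg g n i (0, "") hi0 hin]
      rw [hstep, ih]

-- B side: the per-column pair fold computes (value, key) of A's key fold
theorem pv_pairfold (D : List (String × List Int)) (i : Int) (l : List (String × List Int)) (a : String)
    (h : ∀ kv ∈ l, PySem.List.pyGetD kv.2 i 0 = pvValA D i kv.1) :
    l.foldl (fun p kv =>
        if PySem.List.pyGetD kv.2 i 0 < p.1 then (PySem.List.pyGetD kv.2 i 0, kv.1) else p)
      (pvValA D i a, a)
    = (pvValA D i ((l.map Prod.fst).foldl (fun b x => if pvValA D i x < pvValA D i b then x else b) a),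
       (l.map Prod.fst).foldl (fun b x => if pvValA D i x < pvValA D i b then x else b) a) := by
  induction l generalizing a with
  | nil => rfl
  | cons kv rest ih =>
      simp only [List.foldl_cons, List.map_cons]
      rw [h kv (List.mem_cons_self ..)]
      by_cases hlt : pvValA D i kv.1 < pvValA D i a
      · rw [if_pos hlt, if_pos hlt]
        exact ih kv.1 (fun x hx => h x (List.mem_cons_of_mem _ hx))
      · rw [if_neg hlt, if_neg hlt]
        exact ih a (fun x hx => h x (List.mem_cons_of_mem _ hx))

-- dict lookup of a member under distinct keys
theorem pv_lookup_nodup (l : List (String × List Int)) (h : (l.map Prod.fst).Nodup) :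
    ∀ kv ∈ l, (PySem.Dict.mk l).get? kv.1 = some kv.2 := by
  induction l with
  | nil => intro kv hkv; cases hkv
  | cons p rest ih =>
      intro kv hkv
      rw [List.map_cons, List.nodup_cons] at h
      rcases List.mem_cons.mp hkv with he | hkv
      · rw [he, PySem.Dict.get?_mk_cons]; simp
      · have hne : (p.1 == kv.1) = false := by
          simp only [beq_eq_false_iff_ne, ne_eq]
          intro he; exact h.1 (he ▸ List.mem_map_of_mem hkv)
        rw [PySem.Dict.get?_mk_cons, hne]
        simp only [Bool.false_eq_true, if_false]
        exact ih h.2 kv hkv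

theorem pv_eq_all (distance : List (String × List Int))
    (hnd : (distance.map Prod.fst).Nodup) :
    find_minimum_values distance = find_minimum_values_alt distance := by
  cases distance with
  | nil => rfl
  | cons hd rest =>
    obtain ⟨k0, v0⟩ := hd
    set D : List (String × List Int) := (k0, v0) :: rest with hD
    set w : Int → String := fun i =>
      (rest.map (fun x => x.1)).foldl
        (fun b x => if pvValA D i x < pvValA D i b then x else b)
        k0 with hw
    set ws : List String := (PySem.List.pyRange 0 (v0.length : Int) 1).map w with hws
    -- head lookup: distance[k0] = v0 (first match)
    have hk0 : ∀ i, pvValA D i k0 = PySem.List.pyGetD v0 i 0 := by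
      intro i
      have : (PySem.Dict.mk D).get? k0 = some v0 := by
        rw [hD, PySem.Dict.get?_mk_cons]; simp
      simp [pvValA, this]
    -- member lookup: distance[kv.1] = kv.2 for kv in rest (needs Nodup)
    have hmem : ∀ i, ∀ kv ∈ rest, PySem.List.pyGetD kv.2 i 0 = pvValA D i kv.1 := by
      intro i kv hkv
      have := pv_lookup_nodup D hnd kv (List.mem_cons_of_mem _ hkv)
      simp [pvValA, this]
    have hfold : ∀ (l : List Int),
        l.foldl (fun c i => PySem.Dict.insert c (w i) (PySem.Dict.getD c (w i) 0 + 1))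
          PySem.Dict.empty = PySem.Dict.counter (l.map w) := by
      intro l
      rw [← PySem.Dict.foldl_insert_getD_add_one_eq_counter, List.foldl_map]
    -- B reduces to max? over the counter of the winners list ws
    have hB : find_minimum_values_alt D
        = (PySem.List.max? (PySem.Dict.counter ws).keys
            (fun k => (PySem.Dict.counter ws).getD k 0)).getD "" := by
      show (let n : Int := v0.length
            let best0 : List (Int × String) :=
              (PySem.List.pyRange 0 n 1).map (fun i => (PySem.List.pyGetD v0 i 0, k0))
            let best := rest.foldl (fun b kv =>
              (PySem.List.pyRange 0 n 1).map (fun i =>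
                if PySem.List.pyGetD kv.2 i 0 < (PySem.List.pyGetD b i (0, "")).1
                then (PySem.List.pyGetD kv.2 i 0, kv.1)
                else PySem.List.pyGetD b i (0, ""))) best0
            let counts := best.foldl (fun c p => c.insert p.2 (c.getD p.2 0 + 1))
              (PySem.Dict.empty : PySem.Dict String Int)
            (PySem.List.max? counts.keys (fun k => counts.getD k 0)).getD "") = _
      simp only
      have hg : (PySem.List.pyRange 0 (v0.length : Int) 1).map
            (fun i => (PySem.List.pyGetD v0 i 0, k0))
          = (PySem.List.pyRange 0 (v0.length : Int) 1).map (fun i => (pvValA D i k0, k0)) := by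
        apply List.map_congr_left; intro i _; rw [hk0 i]
      rw [hg, pv_transpose]
      have hcols : (PySem.List.pyRange 0 (v0.length : Int) 1).map (fun i =>
            rest.foldl (fun p kv =>
              if PySem.List.pyGetD kv.2 i 0 < p.1 then (PySem.List.pyGetD kv.2 i 0, kv.1) else p)
              (pvValA D i k0, k0))
          = (PySem.List.pyRange 0 (v0.length : Int) 1).map (fun i => (pvValA D i (w i), w i)) := by
        apply List.map_congr_left; intro i _
        rw [pv_pairfold D i rest k0 (hmem i)]
      rw [hcols, List.foldl_map]
      rw [hfold]
    have hlen : (((PySem.List.pyRange 0 (v0.length : Int) 1).map (fun i =>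
          ((List.map (fun k => pvValA D i k) (List.map (fun x => x.1) rest)).foldl
            min (pvValA D i k0)))).length : Int) = (v0.length : Int) := by
      simp only [List.length_map, PySem.List.length_pyRange_one]
      omega
    have hA : find_minimum_values D
        = ((PySem.Dict.counter ws).keys.find? (fun k =>
            (PySem.Dict.counter ws).getD k 0
              == (PySem.List.max? (PySem.Dict.counter ws).values (fun v => v)).getD 0)).getD "" := by
      simp only [find_minimum_values, hD, PySem.Dict.values_mk, PySem.Dict.keys_mk,
        List.map_cons, List.head?_cons, Option.getD_some, PySem.List.min?_id_cons]
      rw [← hD, hlen]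
      rw [PySem.List.foldl_congr_mem (PySem.List.pyRange 0 (v0.length : Int) 1) _
        (fun c i => PySem.Dict.insert c (w i) (PySem.Dict.getD c (w i) 0 + 1)) PySem.Dict.empty ?_]
      · exact congrArg (fun c => ((PySem.Dict.keys c).find? (fun k =>
            PySem.Dict.getD c k 0
              == (PySem.List.max? (PySem.Dict.values c) (fun v => v)).getD 0)).getD "")
          (hfold (PySem.List.pyRange 0 ((v0.length : Int)) 1))
      · intro c i hi
        obtain ⟨hi0, hin⟩ := PySem.List.mem_pyRange_one.mp hi
        rw [pv_scanA_eq_find]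
        rw [PySem.List.pyGetD_map_pyRange_of_nonneg (fun i =>
          ((List.map (fun k => pvValA D i k) (List.map (fun x => x.1) rest)).foldl
            min (pvValA D i k0))) ((v0.length : Int)) i 0 hi0 hin]
        rw [pv_find_first_min (fun k => pvValA D i k) k0 (List.map (fun x => x.1) rest)]
    rw [hA, hB]
    exact pv_final_eq ws

-- ===== VERDICT (by name: the statement is the Claim_ definition above) =====
theorem find_minimum_values_spec : Claim_equal_find_minimum_values := by
  intro distance _ hpre
  unfold Spec_find_minimum_values
  exact pv_eq_all distance hpre.2.1
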